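-- pv_equiv track=rewrite | github.com/zstoebs/Daily-Coding-Problem | February 2020/2-17-2020.py | pythag_triplet
-- ===== SOURCE A (Python) =====
-- def pythag_triplet(arr: list):
--
--     arr.sort()
--     n = len(arr)
--
--     for i, a in enumerate(arr):
--         for j, b in enumerate(arr[i+1:]):
--             for c in arr[j+1:]:
--                 if a**2 + b**2 == c**2:
--                     return True
--
--     return False
-- ===== SOURCE B (Python) =====
-- def pythag_triplet(arr: list):
--     s = sorted(arr)
--     last = {v * v: i for i, v in enumerate(s)}
--     for i, a in enumerate(s):
--         for j, b in enumerate(s[i + 1:], i + 1):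
--             if last.get(a * a + b * b, -1) > j:
--                 return True
--     return False
-- ===== Notes on version B (the rewrite author's own statement) =====
-- stated objective: faster
-- what changed: A scans all triples in three nested loops (O(n^3)); B sorts once, builds a dict from each square to its last index, and for each pair checks the sum of squares in the dict (O(n^2)); B also fixes A's misindexed inner slice (see differs).
-- intended difference: A's inner loop iterates over arr[j+1:] with j relative to arr[i+1:], so on inputs where the only equation a^2+b^2=c^2 puts c at a position <= that of b in the sorted array (e.g. [0,1], where b is reused as its own hypotenuse) A returns True although no three distinct positions form a triple; B returns False there, the intended answer. — e.g. on pythag_triplet([0, 1]): A returns true, B returns false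
import Mathlib
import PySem

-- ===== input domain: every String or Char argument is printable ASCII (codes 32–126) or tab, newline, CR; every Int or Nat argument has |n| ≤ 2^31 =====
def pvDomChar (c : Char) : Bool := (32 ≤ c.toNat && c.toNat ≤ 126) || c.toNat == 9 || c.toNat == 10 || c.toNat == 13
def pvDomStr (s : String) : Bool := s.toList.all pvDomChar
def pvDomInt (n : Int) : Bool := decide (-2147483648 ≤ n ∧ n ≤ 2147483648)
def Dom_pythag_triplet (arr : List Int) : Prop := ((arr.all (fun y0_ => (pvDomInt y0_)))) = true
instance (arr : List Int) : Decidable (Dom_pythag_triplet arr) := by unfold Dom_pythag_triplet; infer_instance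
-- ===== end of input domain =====

-- B replaces A's cubic triple scan by one sort plus a square->last-index dict and a pair scan,
-- and fixes A's misindexed inner slice (see D_ below); equivalence is about the RETURN value only
-- (Python A sorts its argument in place, B does not mutate it).


-- ===== PORT A =====
-- innermost loop: 'for c in arr[j+1:]: if a**2 + b**2 == c**2: return True'
def pvLoopA3 (a b : Int) (cs : List Int) : Bool :=
  match cs with
  | [] => false
  | c :: rest => if a ^ 2 + b ^ 2 == c ^ 2 then true else pvLoopA3 a b rest

-- middle loop: 'for j, b in enumerate(arr[i+1:]): ...'
def pvLoopA2 (s : List Int) (a : Int) (jbs : List (Int × Int)) : Bool :=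
  match jbs with
  | [] => false
  | jb :: rest =>
    if pvLoopA3 a jb.2 (PySem.List.slice s (some (jb.1 + 1)) none) then true
    else pvLoopA2 s a rest

-- outer loop: 'for i, a in enumerate(arr): ...'
def pvLoopA1 (s : List Int) (ias : List (Int × Int)) : Bool :=
  match ias with
  | [] => false
  | ia :: rest =>
    if pvLoopA2 s ia.2 (PySem.List.enumerate (PySem.List.slice s (some (ia.1 + 1)) none) 0) then true
    else pvLoopA1 s rest

def pythag_triplet (arr : List Int) : Bool :=
  let s := PySem.List.sorted arr (fun x => x) false
  let _n := s.length
  pvLoopA1 s (PySem.List.enumerate s 0)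

-- ===== PORT B =====
-- inner loop: 'for j, b in enumerate(s[i+1:], i+1): if last.get(a*a+b*b, -1) > j: return True'
def pvLoopB2 (last : PySem.Dict Int Int) (a : Int) (jbs : List (Int × Int)) : Bool :=
  match jbs with
  | [] => false
  | jb :: rest =>
    if last.getD (a * a + jb.2 * jb.2) (-1) > jb.1 then true
    else pvLoopB2 last a rest

-- outer loop: 'for i, a in enumerate(s): ...'
def pvLoopB1 (s : List Int) (last : PySem.Dict Int Int) (ias : List (Int × Int)) : Bool :=
  match ias with
  | [] => false
  | ia :: rest =>
    if pvLoopB2 last ia.2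
        (PySem.List.enumerate (PySem.List.slice s (some (ia.1 + 1)) none) (ia.1 + 1)) then true
    else pvLoopB1 s last rest

def pythag_triplet_alt (arr : List Int) : Bool :=
  let s := PySem.List.sorted arr (fun x => x) false
  let last := (PySem.List.enumerate s 0).foldl
    (fun d iv => d.insert (iv.2 * iv.2) iv.1) (PySem.Dict.empty : PySem.Dict Int Int)
  pvLoopB1 s last (PySem.List.enumerate s 0)

-- ===== PRECONDITION & SPEC =====
-- A's inner slice arr[j+1:] uses j relative to arr[i+1:], so A also accepts a "hypotenuse" at an
-- index ≤ j (e.g. b itself, as in [0, 1]); on exactly the inputs below A returns True although no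
-- three distinct positions of the sorted array form a triple, while B returns False, the intended answer.
def D_pythag_triplet (arr : List Int) : Prop :=
  let s := arr.mergeSort (fun a b => decide (a ≤ b))
  (∃ p q k : Fin s.length, p < q ∧ q.1 - p.1 ≤ k.1 ∧ s.get p ^ 2 + s.get q ^ 2 = s.get k ^ 2) ∧
  ¬ ∃ p q k : Fin s.length, p < q ∧ q < k ∧ s.get p ^ 2 + s.get q ^ 2 = s.get k ^ 2
instance (arr : List Int) : Decidable (D_pythag_triplet arr) := by
  unfold D_pythag_triplet; infer_instance

def Spec_pythag_triplet (arr : List Int) (out : Bool) : Prop :=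
  ¬ D_pythag_triplet arr → out = pythag_triplet_alt arr
instance (arr : List Int) (out : Bool) : Decidable (Spec_pythag_triplet arr out) := by
  unfold Spec_pythag_triplet; infer_instance

def pvDiffWitness_pythag_triplet : List Int := [0, 1]
def pvDiffWitnessOut_pythag_triplet : Bool × Bool := (true, false)

-- ===== CLAIM (what is proved, stated in full; the proofs are below) =====
def Claim_unchanged_pythag_triplet : Prop := ∀ (arr : List Int), Dom_pythag_triplet arr → Spec_pythag_triplet arr (pythag_triplet arr)
def Claim_changed_pythag_triplet : Prop := Dom_pythag_triplet (pvDiffWitness_pythag_triplet) ∧ D_pythag_triplet (pvDiffWitness_pythag_triplet) ∧ pythag_triplet (pvDiffWitness_pythag_triplet) = pvDiffWitnessOut_pythag_triplet.1 ∧ pythag_triplet_alt (pvDiffWitness_pythag_triplet) = pvDiffWitnessOut_pythag_triplet.2 ∧ pvDiffWitnessOut_pythag_triplet.1 ≠ pvDiffWitnessOut_pythag_triplet.2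
def Claim_exact_pythag_triplet : Prop := ∀ (arr : List Int), Dom_pythag_triplet arr → D_pythag_triplet arr → pythag_triplet arr ≠ pythag_triplet_alt arr

-- ===== LEMMAS AND PROOFS =====

-- square of the element at (Nat) position k of s
def pvSq (s : List Int) (k : Nat) : Int := (s.getD k 0) * (s.getD k 0)

-- what A computes on the sorted list: the hypotenuse index k is only bounded by k ≥ q - p
def pvPA (s : List Int) : Prop :=
  ∃ p < s.length, ∃ q < s.length, ∃ k < s.length,
    p < q ∧ q - p ≤ k ∧ pvSq s p + pvSq s q = pvSq s k

-- a genuine triple at three increasing positions of the sorted list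
def pvPB (s : List Int) : Prop :=
  ∃ p < s.length, ∃ q < s.length, ∃ k < s.length,
    p < q ∧ q < k ∧ pvSq s p + pvSq s q = pvSq s k

-- the PySem stable sort by the identity key is plain ascending mergeSort
theorem pvSortedEq (l : List Int) :
    PySem.List.sorted l (fun x => x) false = l.mergeSort (fun a b => decide (a ≤ b)) := by
  have hperm : (PySem.List.sorted l (fun x => x) false).Perm
      (l.mergeSort (fun a b => decide (a ≤ b))) :=
    (PySem.List.sorted_perm l (fun x => x) false).trans (List.mergeSort_perm l _).symm
  have h2 : List.Pairwise (fun a b : Int => a ≤ b) (l.mergeSort (fun a b => decide (a ≤ b))) := by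
    have h := List.pairwise_mergeSort (le := fun a b : Int => decide (a ≤ b))
      (by intro a b c; simp; omega) (by intro a b; simp; omega) l
    exact h.imp (by intro a b hb; simpa using hb)
  exact List.Perm.eq_of_pairwise (le := fun a b : Int => a ≤ b)
    (by intro a b _ _ h1 h2; omega) (PySem.List.sorted_pairwise l (fun x => x)) h2 hperm

-- D_ in terms of pvPA / pvPB on the PySem sort
theorem pvD_iff (arr : List Int) :
    D_pythag_triplet arr ↔
      (pvPA (PySem.List.sorted arr (fun x => x) false) ∧
       ¬ pvPB (PySem.List.sorted arr (fun x => x) false)) := by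
  unfold D_pythag_triplet
  rw [← pvSortedEq arr]
  simp only [List.get_eq_getElem]
  set s := PySem.List.sorted arr (fun x => x) false with hs
  have sq : ∀ (i : Nat) (h : i < s.length), pvSq s i = s[i]'h ^ 2 := fun i h => by
    rw [pvSq, List.getD_eq_getElem s 0 h]; ring
  constructor
  · rintro ⟨⟨p, q, k, h1, h2, h3⟩, hn⟩
    refine ⟨⟨p.1, p.2, q.1, q.2, k.1, k.2, h1, h2, ?_⟩, ?_⟩
    · rw [sq p.1 p.2, sq q.1 q.2, sq k.1 k.2]; exact h3
    · rintro ⟨p', hp', q', hq', k', hk', g1, g2, g3⟩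
      exact hn ⟨⟨p', hp'⟩, ⟨q', hq'⟩, ⟨k', hk'⟩, g1, g2, by
        rw [sq p' hp', sq q' hq', sq k' hk'] at g3; exact g3⟩
  · rintro ⟨⟨p, hp, q, hq, k, hk, h1, h2, h3⟩, hn⟩
    refine ⟨⟨⟨p, hp⟩, ⟨q, hq⟩, ⟨k, hk⟩, h1, h2, ?_⟩, ?_⟩
    · rw [sq p hp, sq q hq, sq k hk] at h3; exact h3
    · rintro ⟨p', q', k', g1, g2, g3⟩
      exact hn ⟨p'.1, p'.2, q'.1, q'.2, k'.1, k'.2, g1, g2, by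
        rw [sq p'.1 p'.2, sq q'.1 q'.2, sq k'.1 k'.2]; exact g3⟩


-- last index (as a Python int, offset by start) at which the square of the element equals t
def pvLastSq (s : List Int) (start t : Int) : Option Int :=
  match s with
  | [] => none
  | x :: xs => (pvLastSq xs (start + 1) t).or (if x * x = t then some start else none)

theorem pvLastSq_ge (s : List Int) (start t m : Int)
    (h : pvLastSq s start t = some m) : start ≤ m := by
  induction s generalizing start m with
  | nil => simp [pvLastSq] at h
  | cons x xs ih =>
    rw [pvLastSq] at h
    cases hx : pvLastSq xs (start + 1) t with
    | some m' =>
      rw [hx, Option.some_or, Option.some.injEq] at h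
      have := ih (start + 1) m' hx
      omega
    | none =>
      rw [hx, Option.none_or] at h
      split_ifs at h with hc
      all_goals simp only [Option.some.injEq] at h
      omega

-- split an existential over positions of (x :: xs)
theorem pvEx_cons (x : Int) (xs : List Int) (t start j : Int) :
    (∃ k < (x :: xs).length, pvSq (x :: xs) k = t ∧ start + k > j) ↔
      ((x * x = t ∧ start > j) ∨ ∃ k < xs.length, pvSq xs k = t ∧ (start + 1) + k > j) := by
  constructor
  · rintro ⟨k, hk, hkt, hkj⟩
    cases k with
    | zero => left; exact ⟨hkt, by simpa using hkj⟩
    | succ k =>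
      right
      refine ⟨k, by simpa using hk, hkt, ?_⟩
      push_cast at hkj ⊢; omega
  · rintro (⟨h1, h2⟩ | ⟨k, hk, hkt, hkj⟩)
    · exact ⟨0, by simp, h1, by simpa using h2⟩
    · refine ⟨k + 1, by simp; omega, hkt, ?_⟩
      push_cast at hkj ⊢; omega

theorem pvLastSq_gt (s : List Int) (start t : Int) (j : Int) (hs : 0 ≤ start) (hj : -1 ≤ j) :
    ((pvLastSq s start t).getD (-1) > j ↔
      ∃ k < s.length, pvSq s k = t ∧ start + k > j) := by
  induction s generalizing start with
  | nil => simp [pvLastSq]; omega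
  | cons x xs ih =>
    have ihx := ih (start + 1) (by omega)
    rw [pvEx_cons, pvLastSq]
    cases hx : pvLastSq xs (start + 1) t with
    | some m =>
      have hm := pvLastSq_ge xs (start + 1) t m hx
      rw [hx] at ihx
      rw [Option.some_or, Option.getD_some]
      rw [Option.getD_some] at ihx
      constructor
      · intro hgt; right; exact ihx.mp hgt
      · rintro (⟨_, h2⟩ | hr)
        · omega
        · exact ihx.mpr hr
    | none =>
      rw [hx] at ihx
      rw [Option.none_or]
      rw [Option.getD_none] at ihx
      have hno : ¬ ∃ k < xs.length, pvSq xs k = t ∧ (start + 1) + k > j := by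
        intro hc; have := ihx.mpr hc; omega
      split_ifs with hc
      · rw [Option.getD_some]
        constructor
        · intro hgt; left; exact ⟨hc, hgt⟩
        · rintro (⟨_, h2⟩ | hr)
          · exact h2
          · exact absurd hr hno
      · rw [Option.getD_none]
        constructor
        · intro hgt; omega
        · rintro (⟨h1, _⟩ | hr)
          · exact absurd h1 hc
          · exact absurd hr hno

-- the dict B builds looks up the last index whose square is t
theorem pvFoldl_insert_getD (s : List Int) (start : Int) (d0 : PySem.Dict Int Int) (t dflt : Int) :
    (((PySem.List.enumerate s start).foldl (fun d iv => d.insert (iv.2 * iv.2) iv.1) d0).getD t dflt)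
      = (pvLastSq s start t).getD (d0.getD t dflt) := by
  induction s generalizing start d0 with
  | nil => simp [PySem.List.enumerate_nil, pvLastSq]
  | cons x xs ih =>
    rw [PySem.List.enumerate_cons, List.foldl_cons, ih, pvLastSq]
    cases hx : pvLastSq xs (start + 1) t with
    | some m => simp
    | none =>
      simp only [Option.none_or, Option.getD_none]
      by_cases hc : x * x = t
      · simp [hc]
      · have hc' : ¬ (t = x * x) := fun h => hc h.symm
        simp [PySem.Dict.getD_insert, hc, hc']

-- characterization of port A's loop nest over an arbitrary list s
theorem pvAnyA_iff (s : List Int) :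
    ((PySem.List.enumerate s 0).any (fun ia =>
      (PySem.List.enumerate (PySem.List.slice s (some (ia.1 + 1)) none) 0).any (fun jb =>
        (PySem.List.slice s (some (jb.1 + 1)) none).any (fun c =>
          ia.2 ^ 2 + jb.2 ^ 2 == c ^ 2))) = true) ↔ pvPA s := by
  rw [List.any_eq_true]
  constructor
  · rintro ⟨ia, hia, h1⟩
    obtain ⟨p, hp, rfl⟩ := (PySem.List.mem_enumerate_iff s 0 ia).mp hia
    rw [List.any_eq_true] at h1
    obtain ⟨jb, hjb, h2⟩ := h1
    have hsl : PySem.List.slice s (some ((0 : Int) + p + 1)) none = s.drop (p + 1) := by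
      have : ((0 : Int) + p + 1) = ((p + 1 : Nat) : Int) := by push_cast; ring
      rw [this, PySem.List.slice_from_natCast]
    rw [hsl] at hjb
    obtain ⟨j', hj', rfl⟩ := (PySem.List.mem_enumerate_iff _ 0 jb).mp hjb
    rw [List.any_eq_true] at h2
    obtain ⟨c, hc, h3⟩ := h2
    have hsl2 : PySem.List.slice s (some ((0 : Int) + j' + 1)) none = s.drop (j' + 1) := by
      have : ((0 : Int) + j' + 1) = ((j' + 1 : Nat) : Int) := by push_cast; ring
      rw [this, PySem.List.slice_from_natCast]
    rw [hsl2] at hc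
    obtain ⟨m, hm, rfl⟩ := List.mem_iff_getElem.mp hc
    simp only [beq_iff_eq] at h3
    have hlen : j' < s.length - (p + 1) := by simpa using hj'
    have hmlen : j' + 1 + m < s.length := by simp at hm; omega
    refine ⟨p, by omega, p + 1 + j', by omega, j' + 1 + m, by omega, by omega, by omega, ?_⟩
    have e1 : pvSq s p = s[p] ^ 2 := by
      rw [pvSq, List.getD_eq_getElem s 0 hp]; ring
    have e2 : pvSq s (p + 1 + j') = (s.drop (p + 1))[j'] ^ 2 := by
      rw [pvSq, List.getD_eq_getElem s 0 (by omega), List.getElem_drop]; ring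
    have e3 : pvSq s (j' + 1 + m) = (s.drop (j' + 1))[m] ^ 2 := by
      rw [pvSq, List.getD_eq_getElem s 0 hmlen, List.getElem_drop]; ring
    rw [e1, e2, e3, h3]
  · rintro ⟨p, hp, q, hq, k, hk, hpq, hqpk, heq⟩
    refine ⟨((p : Int), s[p]), (PySem.List.mem_enumerate_iff s 0 _).mpr ⟨p, hp, by simp⟩, ?_⟩
    simp only []
    rw [List.any_eq_true]
    have hsl : PySem.List.slice s (some ((p : Int) + 1)) none = s.drop (p + 1) := by
      have : ((p : Int) + 1) = ((p + 1 : Nat) : Int) := by push_cast; ring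
      rw [this, PySem.List.slice_from_natCast]
    set j' := q - (p + 1) with hj'def
    have hj'lt : j' < (s.drop (p + 1)).length := by simp; omega
    refine ⟨((j' : Int), (s.drop (p + 1))[j']), ?_, ?_⟩
    · rw [hsl]
      exact (PySem.List.mem_enumerate_iff _ 0 _).mpr ⟨j', hj'lt, by simp⟩
    · simp only []
      rw [List.any_eq_true]
      have hsl2 : PySem.List.slice s (some ((j' : Int) + 1)) none = s.drop (j' + 1) := by
        have : ((j' : Int) + 1) = ((j' + 1 : Nat) : Int) := by push_cast; ring
        rw [this, PySem.List.slice_from_natCast]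
      set m := k - (j' + 1) with hmdef
      have hmlt : m < (s.drop (j' + 1)).length := by simp; omega
      refine ⟨(s.drop (j' + 1))[m], ?_, ?_⟩
      · rw [hsl2]; exact List.mem_iff_getElem.mpr ⟨m, hmlt, rfl⟩
      · simp only [beq_iff_eq]
        have e1 : s[p] ^ 2 = pvSq s p := by
          rw [pvSq, List.getD_eq_getElem s 0 hp]; ring
        have e2 : (s.drop (p + 1))[j'] ^ 2 = pvSq s q := by
          rw [pvSq, List.getD_eq_getElem s 0 hq, List.getElem_drop, pow_two]
          have hh : p + 1 + j' = q := by omega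
          simp [hh]
        have e3 : (s.drop (j' + 1))[m] ^ 2 = pvSq s k := by
          rw [pvSq, List.getD_eq_getElem s 0 hk, List.getElem_drop, pow_two]
          have hh : j' + 1 + m = k := by omega
          simp [hh]
        rw [e1, e2, e3, heq]

-- characterization of port B's loop nest over an arbitrary list s
theorem pvAnyB_iff (s : List Int) :
    ((PySem.List.enumerate s 0).any (fun ia =>
      (PySem.List.enumerate (PySem.List.slice s (some (ia.1 + 1)) none) (ia.1 + 1)).any (fun jb =>
        ((PySem.List.enumerate s 0).foldl
          (fun d iv => d.insert (iv.2 * iv.2) iv.1) (PySem.Dict.empty : PySem.Dict Int Int)).getD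
            (ia.2 * ia.2 + jb.2 * jb.2) (-1) > jb.1)) = true) ↔ pvPB s := by
  rw [List.any_eq_true]
  constructor
  · rintro ⟨ia, hia, h1⟩
    obtain ⟨p, hp, rfl⟩ := (PySem.List.mem_enumerate_iff s 0 ia).mp hia
    rw [List.any_eq_true] at h1
    obtain ⟨jb, hjb, h2⟩ := h1
    have hsl : PySem.List.slice s (some ((0 : Int) + p + 1)) none = s.drop (p + 1) := by
      have : ((0 : Int) + p + 1) = ((p + 1 : Nat) : Int) := by push_cast; ring
      rw [this, PySem.List.slice_from_natCast]
    rw [hsl] at hjb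
    obtain ⟨j', hj', rfl⟩ := (PySem.List.mem_enumerate_iff _ ((0 : Int) + p + 1) jb).mp hjb
    simp only [decide_eq_true_eq] at h2
    rw [pvFoldl_insert_getD s 0 _ _ (-1), PySem.Dict.getD_empty] at h2
    have h2' := (pvLastSq_gt s 0 _ ((0 : Int) + p + 1 + j') (by omega) (by omega)).mp h2
    obtain ⟨k, hk, hkt, hkj⟩ := h2'
    have hlen : j' < s.length - (p + 1) := by simpa using hj'
    set q := p + 1 + j' with hqdef
    refine ⟨p, by omega, q, by omega, k, hk, by omega, by omega, ?_⟩
    have e1 : s[p] * s[p] = pvSq s p := by rw [pvSq, List.getD_eq_getElem s 0 hp]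
    have e2 : (s.drop (p + 1))[j'] * (s.drop (p + 1))[j'] = pvSq s q := by
      rw [pvSq, List.getD_eq_getElem s 0 (by omega), List.getElem_drop]
    rw [e1, e2] at hkt
    exact hkt.symm
  · rintro ⟨p, hp, q, hq, k, hk, hpq, hqk, heq⟩
    refine ⟨((p : Int), s[p]), (PySem.List.mem_enumerate_iff s 0 _).mpr ⟨p, hp, by simp⟩, ?_⟩
    simp only []
    rw [List.any_eq_true]
    have hsl : PySem.List.slice s (some ((p : Int) + 1)) none = s.drop (p + 1) := by
      have : ((p : Int) + 1) = ((p + 1 : Nat) : Int) := by push_cast; ring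
      rw [this, PySem.List.slice_from_natCast]
    set j' := q - (p + 1) with hj'def
    have hj'lt : j' < (s.drop (p + 1)).length := by simp; omega
    refine ⟨((p : Int) + 1 + j', (s.drop (p + 1))[j']), ?_, ?_⟩
    · rw [hsl]
      exact (PySem.List.mem_enumerate_iff _ ((p : Int) + 1) _).mpr ⟨j', hj'lt, by simp⟩
    · simp only [decide_eq_true_eq]
      rw [pvFoldl_insert_getD s 0 _ _ (-1), PySem.Dict.getD_empty]
      apply (pvLastSq_gt s 0 _ ((p : Int) + 1 + j') (by omega) (by omega)).mpr
      refine ⟨k, hk, ?_, by omega⟩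
      have e1 : s[p] * s[p] = pvSq s p := by rw [pvSq, List.getD_eq_getElem s 0 hp]
      have e2 : (s.drop (p + 1))[j'] * (s.drop (p + 1))[j'] = pvSq s q := by
        rw [pvSq, List.getD_eq_getElem s 0 hq, List.getElem_drop]
        have hh : p + 1 + j' = q := by omega
        simp [hh]
      rw [e1, e2, heq]

-- each early-return loop equals the corresponding .any
theorem pvLoopA3_eq (a b : Int) (cs : List Int) :
    pvLoopA3 a b cs = cs.any (fun c => a ^ 2 + b ^ 2 == c ^ 2) := by
  induction cs with
  | nil => rfl
  | cons c rest ih => rw [pvLoopA3, List.any_cons, ih]; by_cases h : (a ^ 2 + b ^ 2 == c ^ 2) = true <;> simp [h]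

theorem pvLoopA2_eq (s : List Int) (a : Int) (jbs : List (Int × Int)) :
    pvLoopA2 s a jbs = jbs.any (fun jb =>
      (PySem.List.slice s (some (jb.1 + 1)) none).any (fun c => a ^ 2 + jb.2 ^ 2 == c ^ 2)) := by
  induction jbs with
  | nil => rfl
  | cons jb rest ih =>
    rw [pvLoopA2, List.any_cons, ih, pvLoopA3_eq]
    by_cases h : ((PySem.List.slice s (some (jb.1 + 1)) none).any
      (fun c => a ^ 2 + jb.2 ^ 2 == c ^ 2)) = true <;> simp [h]

theorem pvLoopA1_eq (s : List Int) (ias : List (Int × Int)) :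
    pvLoopA1 s ias = ias.any (fun ia =>
      (PySem.List.enumerate (PySem.List.slice s (some (ia.1 + 1)) none) 0).any (fun jb =>
        (PySem.List.slice s (some (jb.1 + 1)) none).any (fun c =>
          ia.2 ^ 2 + jb.2 ^ 2 == c ^ 2))) := by
  induction ias with
  | nil => rfl
  | cons ia rest ih =>
    rw [pvLoopA1, List.any_cons, ih, pvLoopA2_eq]
    by_cases h : ((PySem.List.enumerate (PySem.List.slice s (some (ia.1 + 1)) none) 0).any
      (fun jb => (PySem.List.slice s (some (jb.1 + 1)) none).any
        (fun c => ia.2 ^ 2 + jb.2 ^ 2 == c ^ 2))) = true <;> simp [h]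

theorem pvLoopB2_eq (last : PySem.Dict Int Int) (a : Int) (jbs : List (Int × Int)) :
    pvLoopB2 last a jbs = jbs.any (fun jb => last.getD (a * a + jb.2 * jb.2) (-1) > jb.1) := by
  induction jbs with
  | nil => rfl
  | cons jb rest ih =>
    rw [pvLoopB2, List.any_cons, ih]
    by_cases h : last.getD (a * a + jb.2 * jb.2) (-1) > jb.1 <;> simp [h]

theorem pvLoopB1_eq (s : List Int) (last : PySem.Dict Int Int) (ias : List (Int × Int)) :
    pvLoopB1 s last ias = ias.any (fun ia =>
      (PySem.List.enumerate (PySem.List.slice s (some (ia.1 + 1)) none) (ia.1 + 1)).any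
        (fun jb => last.getD (ia.2 * ia.2 + jb.2 * jb.2) (-1) > jb.1)) := by
  induction ias with
  | nil => rfl
  | cons ia rest ih =>
    rw [pvLoopB1, List.any_cons, ih, pvLoopB2_eq]
    by_cases h : ((PySem.List.enumerate (PySem.List.slice s (some (ia.1 + 1)) none) (ia.1 + 1)).any
      (fun jb => last.getD (ia.2 * ia.2 + jb.2 * jb.2) (-1) > jb.1)) = true <;> simp [h]

theorem pvA_iff (arr : List Int) :
    pythag_triplet arr = true ↔ pvPA (PySem.List.sorted arr (fun x => x) false) := by
  rw [pythag_triplet]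
  simp only [pvLoopA1_eq]
  exact pvAnyA_iff _

theorem pvB_iff (arr : List Int) :
    pythag_triplet_alt arr = true ↔ pvPB (PySem.List.sorted arr (fun x => x) false) := by
  rw [pythag_triplet_alt]
  simp only [pvLoopB1_eq]
  exact pvAnyB_iff _

theorem pvPB_imp_pvPA (s : List Int) : pvPB s → pvPA s := by
  rintro ⟨p, hp, q, hq, k, hk, hpq, hqk, heq⟩
  exact ⟨p, hp, q, hq, k, hk, hpq, by omega, heq⟩

-- ===== VERDICT (by name: the statement is the Claim_ definition above) =====
theorem pythag_triplet_spec : Claim_unchanged_pythag_triplet := by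
  intro arr _ hD
  rw [pvD_iff] at hD
  by_cases hB : pvPB (PySem.List.sorted arr (fun x => x) false)
  · rw [(pvB_iff arr).mpr hB, (pvA_iff arr).mpr (pvPB_imp_pvPA _ hB)]
  · have hA : ¬ pvPA (PySem.List.sorted arr (fun x => x) false) := fun h => hD ⟨h, hB⟩
    have b1 : pythag_triplet arr = false := by
      cases h : pythag_triplet arr
      · rfl
      · exact absurd ((pvA_iff arr).mp h) hA
    have b2 : pythag_triplet_alt arr = false := by
      cases h : pythag_triplet_alt arr
      · rfl
      · exact absurd ((pvB_iff arr).mp h) hB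
    rw [b1, b2]

theorem pythag_triplet_changed : Claim_changed_pythag_triplet := by
  unfold Claim_changed_pythag_triplet
  refine ⟨by decide, (pvD_iff _).mpr ?_, by decide, by decide, by decide⟩
  unfold pvPA pvPB
  decide

theorem pythag_triplet_tight : Claim_exact_pythag_triplet := by
  intro arr _ hD
  obtain ⟨hA, hB⟩ := (pvD_iff arr).mp hD
  rw [(pvA_iff arr).mpr hA]
  have b2 : pythag_triplet_alt arr = false := by
    cases h : pythag_triplet_alt arr
    · rfl
    · exact absurd ((pvB_iff arr).mp h) hB
  rw [b2]
  simp
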